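-- pv_equiv track=rewrite | github.com/itsme-zeix/adventofcode | 2025/day02/day02.py | part2_par_worker
-- ===== SOURCE A (Python) =====
-- def is_invalid(id: str, id_len: int, substr_len: int) -> bool:
--     substr = id[0: substr_len]
--     repeat_count = id_len // substr_len
--     return id == (repeat_count * substr)
--
-- def part2_par_worker(l: int, r: int) -> int:
--     local_sum = 0
--     for id_int in range(l, r + 1):
--         id_str = str(id_int)
--         id_len = len(id_str)
--
--         max_substr_len = id_len // 2
--         for substr_len in range(max_substr_len, 0, -1):
--             if id_len % substr_len != 0:
--                 continue
--             if is_invalid(id_str, id_len, substr_len):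
--                 local_sum += id_int
--                 break
--     return local_sum
-- ===== SOURCE B (Python) =====
-- def part2_par_worker(l: int, r: int) -> int:
--     # Enumerate the periodic numbers (decimal string = some block repeated >= 2 times)
--     # inside [l, r] directly, instead of testing every integer in the range.
--     hi = r
--     lo = l if l > 10 else 10  # no integer below 10 is periodic (incl. 0 and negatives)
--     seen = set()
--     if lo <= hi:
--         max_len = len(str(hi))
--         for L in range(2, max_len + 1):
--             for d in range(1, L // 2 + 1):
--                 if L % d != 0:
--                     continue
--                 S = (10 ** L - 1) // (10 ** d - 1)  # value of block '1'*? repeated L//d times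
--                 p_lo = 10 ** (d - 1)
--                 c = -(lo // -S)  # ceil(lo / S), lo > 0
--                 if c > p_lo:
--                     p_lo = c
--                 p_hi = 10 ** d - 1
--                 f = hi // S
--                 if f < p_hi:
--                     p_hi = f
--                 for p in range(p_lo, p_hi + 1):
--                     seen.add(p * S)
--     return sum(seen)
-- ===== Notes on version B (the rewrite author's own statement) =====
-- stated objective: faster
-- what changed: Instead of testing every integer in [l, r] against all divisor-length prefixes of its decimal string, B directly enumerates the periodic numbers (block value p times the repunit-like factor S = (10^L-1)/(10^d-1)) whose value falls in [l, r], deduplicates them in a set and sums.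
import Mathlib
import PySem

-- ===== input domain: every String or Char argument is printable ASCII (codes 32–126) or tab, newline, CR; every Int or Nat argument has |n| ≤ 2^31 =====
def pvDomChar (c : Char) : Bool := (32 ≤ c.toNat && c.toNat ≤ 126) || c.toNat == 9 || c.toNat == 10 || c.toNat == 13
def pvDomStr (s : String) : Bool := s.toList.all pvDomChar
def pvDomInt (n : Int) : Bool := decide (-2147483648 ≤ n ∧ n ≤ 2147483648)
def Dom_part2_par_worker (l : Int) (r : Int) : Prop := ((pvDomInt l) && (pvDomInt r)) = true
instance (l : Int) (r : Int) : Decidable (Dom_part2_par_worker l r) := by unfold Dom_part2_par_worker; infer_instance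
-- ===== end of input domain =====

-- ===== PORT A =====
-- A iterates over [l, r] and tests each integer's decimal string against every
-- divisor-length prefix, from the largest down, with break on the first repetition hit.
def is_invalid (id : List Char) (id_len : Int) (substr_len : Int) : Bool :=
  let substr := PySem.List.slice id (some 0) (some substr_len)
  let repeat_count := PySem.Int.floordiv id_len substr_len
  id == PySem.List.pyRepeat substr repeat_count

-- the inner 'for substr_len in range(max_substr_len, 0, -1)' with continue/break:
-- returns whether the break (and hence the 'local_sum += id_int') was reached
def part2InnerFound (id_str : List Char) (id_len : Int) : List Int → Bool
  | [] => false
  | substr_len :: rest =>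
    if PySem.Int.mod id_len substr_len ≠ 0 then part2InnerFound id_str id_len rest
    else if is_invalid id_str id_len substr_len then true
    else part2InnerFound id_str id_len rest

def part2_par_worker (l : Int) (r : Int) : Int :=
  (PySem.List.pyRange l (r + 1) 1).foldl
    (fun local_sum id_int =>
      let id_str := PySem.Int.toChars id_int
      let id_len := PySem.List.len id_str
      let max_substr_len := PySem.Int.floordiv id_len 2
      if part2InnerFound id_str id_len (PySem.List.pyRange max_substr_len 0 (-1)) then
        local_sum + id_int
      else local_sum)
    0

-- ===== PORT B =====
-- B enumerates periodic numbers p * S (S = (10^L-1)/(10^d-1)) inside [l, r] into a set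
-- and sums it.  '10 ** e' is ported as '(10 : Int) ^ e.toNat' (exact: every exponent
-- reached is nonnegative); sum over a Python set of ints is order-independent.
def part2_par_worker_alt (l : Int) (r : Int) : Int :=
  let hi := r
  let lo := if l > 10 then l else 10
  let seen : PySem.Set Int :=
    if lo ≤ hi then
      let max_len := PySem.List.len (PySem.Int.toChars hi)
      (PySem.List.pyRange 2 (max_len + 1) 1).foldl
        (fun seen L =>
          (PySem.List.pyRange 1 (PySem.Int.floordiv L 2 + 1) 1).foldl
            (fun seen d =>
              if PySem.Int.mod L d ≠ 0 then seen
              else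
                let S := PySem.Int.floordiv ((10 : Int) ^ L.toNat - 1) ((10 : Int) ^ d.toNat - 1)
                let p_lo0 := (10 : Int) ^ (d - 1).toNat
                let c := -(PySem.Int.floordiv lo (-S))
                let p_lo := if c > p_lo0 then c else p_lo0
                let p_hi0 := (10 : Int) ^ d.toNat - 1
                let f := PySem.Int.floordiv hi S
                let p_hi := if f < p_hi0 then f else p_hi0
                (PySem.List.pyRange p_lo (p_hi + 1) 1).foldl
                  (fun seen p => PySem.Set.add seen (p * S)) seen)
            seen)
        PySem.Set.empty
    else PySem.Set.empty
  seen.sum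

-- ===== PRECONDITION & SPEC =====
def Spec_part2_par_worker (l : Int) (r : Int) (out : Int) : Prop := out = part2_par_worker_alt l r
instance (l : Int) (r : Int) (out : Int) : Decidable (Spec_part2_par_worker l r out) := by unfold Spec_part2_par_worker; infer_instance

-- ===== CLAIM (what is proved, stated in full; the proofs are below) =====
def Claim_equal_part2_par_worker : Prop := ∀ (l : Int) (r : Int), Dom_part2_par_worker l r → Spec_part2_par_worker l r (part2_par_worker l r)

-- ===== LEMMAS AND PROOFS =====

-- ---- decimal digit strings: PySem.Int.toChars via the structural digChars ----

def digChars (n : Nat) : List Char :=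
  if _h : n < 10 then [Nat.digitChar n]
  else digChars (n / 10) ++ [Nat.digitChar (n % 10)]
decreasing_by exact Nat.div_lt_self (by omega) (by omega)

lemma digChars_lt (n : Nat) (h : n < 10) : digChars n = [Nat.digitChar n] := by
  rw [digChars]; simp [h]

lemma digChars_ge (n : Nat) (h : ¬ n < 10) : digChars n = digChars (n / 10) ++ [Nat.digitChar (n % 10)] := by
  rw [digChars]; simp [h]

lemma digitChar_toNat (v : Nat) (h : v < 10) : (Nat.digitChar v).toNat = 48 + v := by
  interval_cases v <;> rfl

lemma digChars_ne_nil (n : Nat) : digChars n ≠ [] := by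
  by_cases h : n < 10
  · rw [digChars_lt n h]; simp
  · rw [digChars_ge n h]; simp

lemma digChars_all (n : Nat) : ∀ c ∈ digChars n, 48 ≤ c.toNat ∧ c.toNat ≤ 57 := by
  induction n using Nat.strong_induction_on with
  | _ n ih =>
    by_cases h : n < 10
    · rw [digChars_lt n h]
      intro c hc; simp at hc; subst hc
      rw [digitChar_toNat n h]; omega
    · rw [digChars_ge n h]
      intro c hc
      rcases List.mem_append.mp hc with h1 | h2
      · exact ih (n/10) (Nat.div_lt_self (by omega) (by omega)) c h1
      · simp at h2; subst h2
        rw [digitChar_toNat _ (Nat.mod_lt n (by omega))]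
        have := Nat.mod_lt n (show 0 < 10 by omega); omega

lemma digChars_head (n : Nat) (h : 1 ≤ n) :
    ∃ c cs, digChars n = c :: cs ∧ 49 ≤ c.toNat ∧ c.toNat ≤ 57 := by
  induction n using Nat.strong_induction_on with
  | _ n ih =>
    by_cases h10 : n < 10
    · refine ⟨Nat.digitChar n, [], digChars_lt n h10, ?_, ?_⟩ <;>
        (rw [digitChar_toNat n h10]; omega)
    · obtain ⟨c, cs, hcs, h1, h2⟩ := ih (n/10) (Nat.div_lt_self (by omega) (by omega))
        (by have := Nat.div_le_div_right (c := 10) (show 10 ≤ n by omega); simp at this; omega)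
      exact ⟨c, cs ++ [Nat.digitChar (n % 10)], by rw [digChars_ge n h10, hcs]; simp, h1, h2⟩

lemma digChars_len_pos (n : Nat) : 1 ≤ (digChars n).length :=
  List.length_pos_of_ne_nil (digChars_ne_nil n)

lemma digChars_bracket (n : Nat) (h : 1 ≤ n) :
    10 ^ ((digChars n).length - 1) ≤ n ∧ n < 10 ^ (digChars n).length := by
  induction n using Nat.strong_induction_on with
  | _ n ih =>
    by_cases h10 : n < 10
    · rw [digChars_lt n h10]; simpa using ⟨h, h10⟩
    · have hq1 : 1 ≤ n / 10 := by
        have := Nat.div_le_div_right (c := 10) (show 10 ≤ n by omega); simp at this; omega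
      obtain ⟨hlo, hhi⟩ := ih (n/10) (Nat.div_lt_self (by omega) (by omega)) hq1
      rw [digChars_ge n h10]
      have hL := digChars_len_pos (n/10)
      set L := (digChars (n/10)).length with hLdef
      have hlen : (digChars (n/10) ++ [Nat.digitChar (n % 10)]).length = L + 1 := by
        simp [hLdef]
      rw [hlen]
      constructor
      · have : 10 ^ (L + 1 - 1) = 10 * 10 ^ (L - 1) := by
          rw [Nat.add_sub_cancel]
          calc 10 ^ L = 10 ^ (L - 1 + 1) := by rw [Nat.sub_add_cancel hL]
          _ = 10 * 10 ^ (L-1) := by ring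
        rw [this]
        calc 10 * 10 ^ (L-1) ≤ 10 * (n / 10) := by omega
        _ ≤ n := by have := Nat.div_add_mod n 10; omega
      · have hmod := Nat.mod_lt n (show 0 < 10 by omega)
        have hdm := Nat.div_add_mod n 10
        have : n < 10 * (n / 10 + 1) := by omega
        calc n < 10 * (n/10 + 1) := this
        _ ≤ 10 * 10 ^ L := by omega
        _ = 10 ^ (L + 1) := by ring

lemma digChars_length_eq (d p : Nat) (hd : 1 ≤ d) (hlo : 10 ^ (d-1) ≤ p) (hhi : p < 10 ^ d) :
    (digChars p).length = d := by
  have hp1 : 1 ≤ p := le_trans (Nat.one_le_pow _ _ (by omega)) hlo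
  obtain ⟨blo, bhi⟩ := digChars_bracket p hp1
  set L := (digChars p).length
  have hL := digChars_len_pos p
  have h1 : L - 1 < d := by
    by_contra hc
    exact absurd (le_trans (Nat.pow_le_pow_right (by omega) (by omega : d ≤ L - 1)) blo) (by omega)
  have h2 : d - 1 < L := by
    by_contra hc
    exact absurd (le_trans (Nat.pow_le_pow_right (by omega) (by omega : L ≤ d - 1)) hlo) (by omega)
  omega

def evD (cs : List Char) : Nat := cs.foldl (fun a c => 10 * a + (c.toNat - 48)) 0

lemma evD_from (cs : List Char) : ∀ a : Nat,
    cs.foldl (fun a c => 10 * a + (c.toNat - 48)) a = a * 10 ^ cs.length + evD cs := by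
  induction cs with
  | nil => intro a; simp [evD]
  | cons c t ih =>
    intro a
    show t.foldl _ (10 * a + (c.toNat - 48)) = _
    rw [ih (10 * a + (c.toNat - 48))]
    have : evD (c :: t) = (c.toNat - 48) * 10 ^ t.length + evD t := by
      show t.foldl _ (10 * 0 + (c.toNat - 48)) = _
      rw [ih (10 * 0 + (c.toNat - 48))]; ring_nf
    rw [this]
    simp [List.length_cons]; ring

lemma evD_cons (c : Char) (t : List Char) :
    evD (c :: t) = (c.toNat - 48) * 10 ^ t.length + evD t := by
  show t.foldl _ (10 * 0 + (c.toNat - 48)) = _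
  rw [evD_from t]; ring_nf

lemma evD_append (xs ys : List Char) :
    evD (xs ++ ys) = evD xs * 10 ^ ys.length + evD ys := by
  unfold evD
  rw [List.foldl_append, evD_from]
  rfl

lemma evD_digChars (n : Nat) : evD (digChars n) = n := by
  induction n using Nat.strong_induction_on with
  | _ n ih =>
    by_cases h : n < 10
    · rw [digChars_lt n h]
      simp [evD, digitChar_toNat n h]
    · rw [digChars_ge n h, evD_append, ih (n/10) (Nat.div_lt_self (by omega) (by omega))]
      have := Nat.mod_lt n (show 0 < 10 by omega)
      simp [evD, digitChar_toNat _ this]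
      have := Nat.div_add_mod n 10; omega

lemma evD_lt (cs : List Char) (hall : ∀ c ∈ cs, c.toNat ≤ 57) : evD cs < 10 ^ cs.length := by
  induction cs with
  | nil => simp [evD]
  | cons c t ih =>
    rw [evD_cons]
    have h1 : c.toNat - 48 ≤ 9 := by have := hall c (by simp); omega
    have h2 := ih (fun c hc => hall c (by simp [hc]))
    have h3 : (10:Nat) ^ (c :: t).length = 10 * 10 ^ t.length := by simp [List.length_cons]; ring
    rw [h3]
    calc (c.toNat - 48) * 10 ^ t.length + evD t ≤ 9 * 10 ^ t.length + evD t :=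
          by have := Nat.mul_le_mul_right (10 ^ t.length) h1; omega
    _ < 10 * 10 ^ t.length := by omega

lemma evD_ge (c : Char) (t : List Char) (h : 49 ≤ c.toNat) :
    10 ^ ((c :: t).length - 1) ≤ evD (c :: t) := by
  rw [evD_cons]
  have h1 : 1 * 10 ^ t.length ≤ (c.toNat - 48) * 10 ^ t.length :=
    Nat.mul_le_mul_right _ (by omega)
  have h2 : (c :: t).length - 1 = t.length := by simp
  rw [h2]; omega

lemma digChars_append : ∀ (d : Nat), 1 ≤ d → ∀ m p : Nat, 1 ≤ m →
    10 ^ (d-1) ≤ p → p < 10 ^ d →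
    digChars (m * 10 ^ d + p) = digChars m ++ digChars p := by
  intro d
  induction d with
  | zero => omega
  | succ d ih =>
    intro _ m p hm hlo hhi
    by_cases hd0 : d = 0
    · subst hd0
      norm_num at hhi
      have hp1 : 1 ≤ p := by simpa using hlo
      have h10 : ¬ (m * 10 ^ 1 + p < 10) := by
        have h : 10 ≤ m * 10 := by omega
        simp only [pow_one]; omega
      rw [digChars_ge _ h10]
      have hdiv : (m * 10 ^ 1 + p) / 10 = m := by simp [pow_one]; omega
      have hmod : (m * 10 ^ 1 + p) % 10 = p := by
        simp [pow_one]; omega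
      rw [hdiv, hmod, digChars_lt p hhi]
    · have hd1 : 1 ≤ d := by omega
      have hplo : 10 ^ (d-1) ≤ p / 10 := by
        have h1 : 10 ^ d ≤ p := by simpa using hlo
        have : 10 ^ d / 10 ≤ p / 10 := Nat.div_le_div_right h1
        have h2 : 10 ^ d / 10 = 10 ^ (d-1) := by
          conv_lhs => rw [show d = d - 1 + 1 by omega]
          rw [pow_succ]
          exact Nat.mul_div_cancel _ (by omega)
        omega
      have hphi : p / 10 < 10 ^ d := by
        rw [Nat.div_lt_iff_lt_mul (by omega)]
        calc p < 10 ^ (d+1) := hhi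
        _ = 10 ^ d * 10 := by ring
      have hp10 : ¬ (p < 10) := by
        have h1 : (10:Nat) ≤ 10 ^ d := by
          calc (10:Nat) = 10 ^ 1 := (pow_one 10).symm
          _ ≤ 10 ^ d := Nat.pow_le_pow_right (by omega) hd1
        have h2 : (10:Nat) ^ (d + 1 - 1) = 10 ^ d := by norm_num
        rw [h2] at hlo; omega
      have hn10 : ¬ (m * 10 ^ (d+1) + p < 10) := by omega
      rw [digChars_ge _ hn10]
      have hdiv : (m * 10 ^ (d+1) + p) / 10 = m * 10 ^ d + p / 10 := by
        have : m * 10 ^ (d+1) + p = (m * 10 ^ d) * 10 + p := by ring_nf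
        rw [this]
        omega
      have hmod : (m * 10 ^ (d+1) + p) % 10 = p % 10 := by
        have : m * 10 ^ (d+1) + p = (m * 10 ^ d) * 10 + p := by ring_nf
        omega
      rw [hdiv, hmod, ih hd1 m (p/10) hm hplo hphi, digChars_ge p hp10]
      simp

def sgN (d : Nat) : Nat → Nat
  | 0 => 0
  | k+1 => sgN d k * 10 ^ d + 1

lemma sgN_ge_one (d k : Nat) (h : 1 ≤ k) : 1 ≤ sgN d k := by
  cases k with
  | zero => omega
  | succ k => simp [sgN]

lemma sgN_mul (d k : Nat) : sgN d k * (10 ^ d - 1) = 10 ^ (d * k) - 1 := by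
  induction k with
  | zero => simp [sgN]
  | succ k ih =>
    have hX : 1 ≤ (10:Nat) ^ d := Nat.one_le_pow _ _ (by omega)
    have hY : 1 ≤ (10:Nat) ^ (d * k) := Nat.one_le_pow _ _ (by omega)
    have hpow : (10:Nat) ^ (d * (k+1)) = 10 ^ (d * k) * 10 ^ d := by
      rw [← pow_add]; ring_nf
    show (sgN d k * 10 ^ d + 1) * (10 ^ d - 1) = _
    rw [hpow]
    have hZ : 1 ≤ (10:Nat) ^ (d * k) * 10 ^ d := Nat.one_le_iff_ne_zero.mpr (by positivity)
    zify [hX, hY, hZ] at *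
    linear_combination ((10:Int) ^ d) * ih

lemma digChars_sg (d p : Nat) (hd : 1 ≤ d) (hlo : 10 ^ (d-1) ≤ p) (hhi : p < 10 ^ d) :
    ∀ k, 1 ≤ k → digChars (p * sgN d k) = (List.replicate k (digChars p)).flatten := by
  have hp1 : 1 ≤ p := le_trans (Nat.one_le_pow _ _ (by omega)) hlo
  intro k
  induction k with
  | zero => omega
  | succ k ih =>
    intro _
    by_cases hk0 : k = 0
    · subst hk0; simp [sgN]
    · have hk1 : 1 ≤ k := by omega
      have hmul : p * sgN d (k+1) = (p * sgN d k) * 10 ^ d + p := by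
        show p * (sgN d k * 10 ^ d + 1) = _
        ring
      have hm1 : 1 ≤ p * sgN d k := Nat.mul_pos hp1 (sgN_ge_one d k hk1)
      rw [hmul, digChars_append d hd _ p hm1 hlo hhi, ih hk1]
      rw [List.replicate_succ']
      simp

-- ---- (more lemmas appended below) ----


lemma toDigitsCore_eq : ∀ (fuel n : Nat) (ds : List Char), n < fuel →
    Nat.toDigitsCore 10 fuel n ds = digChars n ++ ds := by
  intro fuel
  induction fuel with
  | zero => omega
  | succ f ih =>
    intro n ds h
    unfold Nat.toDigitsCore
    by_cases h10 : n < 10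
    · have hz : n / 10 = 0 := Nat.div_eq_of_lt h10
      have hm : n % 10 = n := Nat.mod_eq_of_lt h10
      simp [hz, hm, digChars_lt n h10]
    · have hne : ¬ (n / 10 = 0) := by
        have := Nat.div_le_div_right (c := 10) (show 10 ≤ n by omega)
        simp at this; omega
      have hlt : n / 10 < f := by
        have := Nat.div_lt_self (show 0 < n by omega) (show 1 < 10 by omega)
        omega
      simp only [hne, if_false]
      rw [ih (n/10) _ hlt, digChars_ge n h10]
      simp

lemma toChars_ofNat (n : Nat) : PySem.Int.toChars (n : Int) = digChars n := by
  unfold PySem.Int.toChars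
  have : ¬ ((n : Int) < 0) := by omega
  simp only [this, if_false, Int.toNat_natCast]
  unfold Nat.toDigits
  exact (toDigitsCore_eq (n+1) n [] (by omega)).trans (by simp)

lemma toChars_nonneg (n : Int) (h : 0 ≤ n) : PySem.Int.toChars n = digChars n.toNat := by
  have := toChars_ofNat n.toNat
  rwa [Int.toNat_of_nonneg h] at this

lemma toChars_neg (n : Int) (h : n < 0) : PySem.Int.toChars n = '-' :: digChars n.natAbs := by
  unfold PySem.Int.toChars
  simp only [h, if_true]
  unfold Nat.toDigits
  rw [toDigitsCore_eq _ _ _ (by omega)]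
  simp

-- ---- the periodicity predicate both programs decide ----
def PerN (n : Int) : Prop :=
  ∃ d k p : Nat, 1 ≤ d ∧ 2 ≤ k ∧ 10 ^ (d-1) ≤ p ∧ p < 10 ^ d ∧ n = ((p * sgN d k : Nat) : Int)

def Afound (n : Int) : Bool :=
  let s := PySem.Int.toChars n
  let L := PySem.List.len s
  part2InnerFound s L (PySem.List.pyRange (PySem.Int.floordiv L 2) 0 (-1))

lemma sgN_succ' (d k : Nat) : sgN d (k+1) = 10 ^ (d * k) + sgN d k := by
  induction k with
  | zero => simp [sgN]
  | succ k ih =>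
    show sgN d (k+1) * 10 ^ d + 1 = 10 ^ (d * (k+1)) + sgN d (k+1)
    conv_lhs => rw [ih]
    have hp : (10:Nat) ^ (d * (k+1)) = 10 ^ (d*k) * 10 ^ d := by rw [← pow_add]; ring_nf
    have hs : sgN d (k+1) = sgN d k * 10 ^ d + 1 := rfl
    rw [hp, hs]; ring

lemma evD_repeat (t : List Char) : ∀ k : Nat,
    evD ((List.replicate k t).flatten) = evD t * sgN t.length k := by
  intro k
  induction k with
  | zero => simp [sgN, evD]
  | succ k ih =>
    rw [List.replicate_succ, List.flatten_cons, evD_append, ih]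
    have hlen : ((List.replicate k t).flatten).length = k * t.length := by
      simp [List.length_flatten]
    rw [hlen, sgN_succ']
    have : (10:Nat) ^ (k * t.length) = 10 ^ (t.length * k) := by ring_nf
    rw [this]; ring

lemma length_repeat (t : List Char) (k : Nat) :
    ((List.replicate k t).flatten).length = k * t.length := by
  simp [List.length_flatten]

lemma PerN_ge_ten (n : Int) (h : PerN n) : 10 ≤ n := by
  obtain ⟨d, k, p, hd, hk, hlo, hhi, hn⟩ := h
  have hrep := digChars_sg d p hd hlo hhi k (by omega)
  have hlen := digChars_length_eq d p hd hlo hhi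
  have hp1 : 1 ≤ p := le_trans (Nat.one_le_pow _ _ (by omega)) hlo
  have hn1 : 1 ≤ p * sgN d k := Nat.mul_pos hp1 (sgN_ge_one d k (by omega))
  obtain ⟨blo, _⟩ := digChars_bracket (p * sgN d k) hn1
  have hL : (digChars (p * sgN d k)).length = k * d := by rw [hrep, length_repeat, hlen]
  rw [hL] at blo
  have h2 : 2 ≤ k * d := by nlinarith
  have : (10:Nat) ≤ 10 ^ (k * d - 1) := by
    calc (10:Nat) = 10 ^ 1 := (pow_one 10).symm
    _ ≤ 10 ^ (k*d-1) := Nat.pow_le_pow_right (by omega) (by omega)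
  have : 10 ≤ p * sgN d k := by omega
  omega

lemma innerFound_any (s : List Char) (L : Int) : ∀ lens : List Int,
    part2InnerFound s L lens
      = lens.any (fun sl => (decide (PySem.Int.mod L sl = 0)) && is_invalid s L sl) := by
  intro lens
  induction lens with
  | nil => rfl
  | cons sl rest ih =>
    show (if PySem.Int.mod L sl ≠ 0 then part2InnerFound s L rest
          else if is_invalid s L sl then true else part2InnerFound s L rest) = _
    rw [List.any_cons]
    by_cases h : PySem.Int.mod L sl = 0
    · simp only [h, ne_eq, not_true_eq_false, if_false, decide_true, Bool.true_and]
      by_cases hinv : is_invalid s L sl <;> simp [hinv, ih]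
    · simp [h, ih]

lemma count_repeat (c : Char) (t : List Char) (m : Nat) :
    ((List.replicate m t).flatten).count c = m * t.count c := by
  induction m with
  | zero => simp
  | succ m ih => rw [List.replicate_succ, List.flatten_cons, List.count_append, ih]; ring

lemma dash_not_in_digChars (n : Nat) : '-' ∉ digChars n := by
  intro h
  exact absurd (digChars_all n '-' h) (by decide)

lemma rc_facts (L sl : Int) (h1 : 0 < sl) (h2 : sl ≤ PySem.Int.floordiv L 2)
    (h3 : PySem.Int.mod L sl = 0) :
    2 ≤ PySem.Int.floordiv L sl ∧ L = sl * PySem.Int.floordiv L sl := by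
  have hdvd : sl ∣ L := (PySem.Int.mod_eq_zero_iff_dvd L sl).mp h3
  have h2L : sl * 2 ≤ L := (PySem.Int.le_floordiv_iff_mul_le (by omega)).mp h2
  obtain ⟨k, hk⟩ := hdvd
  have hfd : PySem.Int.floordiv L sl = k := by
    rw [PySem.Int.floordiv_eq_ediv_of_pos h1, hk, Int.mul_ediv_cancel_left _ (by omega)]
  have hk2 : 2 ≤ k := by nlinarith
  exact ⟨hfd ▸ hk2, by rw [hfd, ← hk]⟩

lemma Afound_neg (n : Int) (h : n < 0) : Afound n = false := by
  unfold Afound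
  rw [innerFound_any, List.any_eq_false]
  intro sl hmem
  obtain ⟨hsl0, hsl2⟩ := PySem.List.mem_pyRange_neg_one.mp hmem
  by_cases hmod : PySem.Int.mod (PySem.List.len (PySem.Int.toChars n)) sl = 0
  case neg => simp only [PySem.List.len_eq] at hmod; simp [hmod]
  case pos =>
    simp only [hmod, decide_true, Bool.true_and]
    intro hinv
    unfold is_invalid at hinv
    have heq := eq_of_beq hinv
    set s := PySem.Int.toChars n with hs
    have hsn : s = '-' :: digChars n.natAbs := toChars_neg n h
    -- count of '-' in s is exactly 1
    have hc1 : s.count '-' = 1 := by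
      rw [hsn, List.count_cons_self, List.count_eq_zero.mpr (dash_not_in_digChars n.natAbs)]
    -- the slice contains '-'
    have hslice : PySem.List.slice s (some 0) (some sl) = s.take sl.toNat := by
      rw [PySem.List.slice_zero_start, PySem.List.slice_to s (by omega)]
    have hmemt : '-' ∈ s.take sl.toNat := by
      rw [hsn]
      have : sl.toNat = (sl.toNat - 1) + 1 := by omega
      rw [this, List.take_succ_cons]
      simp
    have hct : 1 ≤ (s.take sl.toNat).count '-' := List.one_le_count_iff.mpr hmemt
    obtain ⟨hrc2, _⟩ := rc_facts (PySem.List.len s) sl hsl0 hsl2 hmod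
    -- counts in the repeated string
    have hcount := congrArg (List.count '-') heq
    rw [hc1] at hcount
    unfold PySem.List.pyRepeat at hcount
    rw [hslice, count_repeat] at hcount
    have : 2 ≤ (PySem.Int.floordiv (PySem.List.len s) sl).toNat := by omega
    nlinarith [hct, hcount]

lemma Afound_small (n : Int) (h0 : 0 ≤ n) (h : n < 10) : Afound n = false := by
  unfold Afound
  have hs : PySem.Int.toChars n = [Nat.digitChar n.toNat] := by
    rw [toChars_nonneg n h0, digChars_lt _ (by omega)]
  rw [hs]
  show part2InnerFound [Nat.digitChar n.toNat] (PySem.List.len [Nat.digitChar n.toNat])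
      (PySem.List.pyRange (PySem.Int.floordiv (PySem.List.len [Nat.digitChar n.toNat]) 2) 0 (-1)) = false
  have hL : PySem.List.len [Nat.digitChar n.toNat] = 1 := by simp
  rw [hL]
  have h2 : PySem.Int.floordiv 1 2 = 0 := by decide
  rw [h2, PySem.List.pyRange_neg_one_eq_nil (by omega)]
  rfl

lemma Afound_iff_Per (n : Int) (h : 10 ≤ n) : Afound n = true ↔ PerN n := by
  have h0 : 0 ≤ n := by omega
  have hn10 : ¬ (n.toNat < 10) := by omega
  have hs : PySem.Int.toChars n = digChars n.toNat := toChars_nonneg n h0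
  unfold Afound
  rw [innerFound_any, List.any_eq_true]
  constructor
  · rintro ⟨sl, hmem, hcond⟩
    obtain ⟨hsl0, hsl2⟩ := PySem.List.mem_pyRange_neg_one.mp hmem
    rw [Bool.and_eq_true, decide_eq_true_eq] at hcond
    obtain ⟨hmod, hinv⟩ := hcond
    obtain ⟨hk2, hLk⟩ := rc_facts _ sl hsl0 hsl2 hmod
    set L : Int := PySem.List.len (PySem.Int.toChars n) with hLdef
    set rc : Int := PySem.Int.floordiv L sl with hrcdef
    set d : Nat := sl.toNat with hddef
    set k : Nat := rc.toNat with hkdef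
    have hd1 : 1 ≤ d := by omega
    have hk2' : 2 ≤ k := by omega
    have hLlen : L = ((PySem.Int.toChars n).length : Int) := by simp [hLdef]
    have hdlen : d ≤ (PySem.Int.toChars n).length := by
      have h2L : sl * 2 ≤ L := (PySem.Int.le_floordiv_iff_mul_le (by omega)).mp hsl2
      omega
    unfold is_invalid at hinv
    have heq := eq_of_beq hinv
    rw [PySem.List.slice_zero_start, PySem.List.slice_to _ (by omega)] at heq
    unfold PySem.List.pyRepeat at heq
    rw [← hrcdef] at heq
    have htlen : ((PySem.Int.toChars n).take d).length = d := by
      rw [List.length_take]; omega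
    have hev : evD (PySem.Int.toChars n) = n.toNat := by rw [hs, evD_digChars]
    have hevrep : evD (PySem.Int.toChars n) = evD ((PySem.Int.toChars n).take d) * sgN d k := by
      conv_lhs => rw [heq]
      rw [evD_repeat, htlen]
    -- head digit and digit bounds
    obtain ⟨c, cs, hcons, hc1, hc2⟩ := digChars_head n.toNat (by omega)
    have hcons' : PySem.Int.toChars n = c :: cs := by rw [hs, hcons]
    have htake : (PySem.Int.toChars n).take d = c :: cs.take (d - 1) := by
      rw [hcons', show d = (d-1)+1 by omega, List.take_succ_cons]
      norm_num
    have hplo : 10 ^ (d - 1) ≤ evD ((PySem.Int.toChars n).take d) := by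
      rw [htake]
      have := evD_ge c (cs.take (d-1)) (by omega)
      have hlen2 : (c :: cs.take (d-1)).length - 1 = d - 1 := by
        have := htake ▸ htlen
        simp at this ⊢
        omega
      rwa [hlen2] at this
    have hphi : evD ((PySem.Int.toChars n).take d) < 10 ^ d := by
      have hall : ∀ x ∈ (PySem.Int.toChars n).take d, x.toNat ≤ 57 := by
        intro x hx
        have hx' : x ∈ digChars n.toNat := by
          rw [← hs]; exact List.mem_of_mem_take hx
        exact (digChars_all n.toNat x hx').2
      have := evD_lt _ hall
      rwa [htlen] at this
    refine ⟨d, k, evD ((PySem.Int.toChars n).take d), hd1, hk2', hplo, hphi, ?_⟩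
    rw [← hevrep, hev, Int.toNat_of_nonneg h0]
  · rintro ⟨d, k, p, hd1, hk2, hplo, hphi, hn⟩
    have hrep := digChars_sg d p hd1 hplo hphi k (by omega)
    have hdp : (digChars p).length = d := digChars_length_eq d p hd1 hplo hphi
    have hsn : PySem.Int.toChars n = (List.replicate k (digChars p)).flatten := by
      have htn : n.toNat = p * sgN d k := by rw [hn]; exact Int.toNat_natCast _
      rw [hs, htn, hrep]
    have hLval : ((PySem.Int.toChars n).length : Int) = ((k * d : Nat) : Int) := by
      rw [hsn, length_repeat, hdp]
    refine ⟨(d : Int), ?_, ?_⟩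
    · rw [PySem.List.mem_pyRange_neg_one]
      constructor
      · omega
      · rw [PySem.Int.le_floordiv_iff_mul_le (by omega)]
        simp only [PySem.List.len_eq]
        rw [hLval]
        push_cast
        nlinarith [hd1, hk2]
    · rw [Bool.and_eq_true, decide_eq_true_eq]
      constructor
      · rw [PySem.Int.mod_eq_zero_iff_dvd]
        simp only [PySem.List.len_eq]
        rw [hLval]
        exact ⟨(k : Int), by push_cast; ring⟩
      · unfold is_invalid
        show (PySem.Int.toChars n ==
          PySem.List.pyRepeat (PySem.List.slice (PySem.Int.toChars n) (some 0) (some (d:Int)))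
            (PySem.Int.floordiv (PySem.List.len (PySem.Int.toChars n)) (d:Int))) = true
        rw [PySem.List.slice_zero_start, PySem.List.slice_to _ (by omega)]
        have htk : (PySem.Int.toChars n).take (d : Int).toNat = digChars p := by
          rw [hsn, show k = (k-1)+1 by omega, List.replicate_succ, List.flatten_cons]
          rw [Int.toNat_natCast, ← hdp, List.take_left]
        have hrc : PySem.Int.floordiv (PySem.List.len (PySem.Int.toChars n)) (d : Int) = (k : Int) := by
          simp only [PySem.List.len_eq]
          rw [hLval, PySem.Int.floordiv_eq_ediv_of_pos (by omega)]
          push_cast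
          exact Int.mul_ediv_cancel _ (by omega)
        rw [htk, hrc]
        unfold PySem.List.pyRepeat
        rw [Int.toNat_natCast, ← hsn]
        exact beq_self_eq_true _

-- ---- generic fold-over-set lemmas ----
lemma mem_foldl_iff {α : Type} (C : α → Int → Prop) (g : PySem.Set Int → α → PySem.Set Int)
    (hg : ∀ s e x, x ∈ g s e ↔ x ∈ s ∨ C e x) :
    ∀ (xs : List α) (s0 : PySem.Set Int) (x : Int),
      x ∈ xs.foldl g s0 ↔ x ∈ s0 ∨ ∃ e ∈ xs, C e x := by
  intro xs
  induction xs with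
  | nil => simp
  | cons e t ih =>
    intro s0 x
    rw [List.foldl_cons, ih, hg]
    simp [or_assoc]

lemma nodup_foldl {α : Type} (g : PySem.Set Int → α → PySem.Set Int)
    (hg : ∀ s e, s.Nodup → (g s e).Nodup) :
    ∀ (xs : List α) (s0 : PySem.Set Int), s0.Nodup → (xs.foldl g s0).Nodup := by
  intro xs
  induction xs with
  | nil => exact fun s0 h => h
  | cons e t ih => exact fun s0 h => ih _ (hg s0 e h)

lemma nodup_set_add (s : PySem.Set Int) (x : Int) (h : s.Nodup) : (PySem.Set.add s x).Nodup := by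
  unfold PySem.Set.add
  split_ifs with hc
  · exact h
  · rw [List.nodup_append]
    have hxs : x ∉ s := fun hm => hc (List.contains_iff_mem.mpr hm)
    refine ⟨h, List.nodup_singleton x, ?_⟩
    intro a ha b hb
    simp only [List.mem_singleton] at hb
    subst hb
    exact fun hax => hxs (hax ▸ ha)

-- ---- ceiling-division bracket for  -(lo // -S) ----
lemma ceil_le_iff (lo S p : Int) (hS : 0 < S) :
    -(PySem.Int.floordiv lo (-S)) ≤ p ↔ lo ≤ p * S := by
  have hdm := PySem.Int.floordiv_mul_add_mod lo (-S)
  obtain ⟨hb1, hb2⟩ := PySem.Int.mod_neg_bounds lo (show -S < 0 by omega)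
  set q := PySem.Int.floordiv lo (-S)
  set m := PySem.Int.mod lo (-S)
  constructor
  · intro hqp
    have : (-q) * S ≤ p * S := mul_le_mul_of_nonneg_right hqp (by omega)
    nlinarith
  · intro hlop
    by_contra hc
    rw [not_le] at hc
    have : p + 1 ≤ -q := by omega
    have : (p+1) * S ≤ (-q) * S := mul_le_mul_of_nonneg_right this (by omega)
    nlinarith

-- ---- the geometric factor S computed by B equals sgN ----
lemma Sval_eq (dN kN : Nat) (hd : 1 ≤ dN) :
    PySem.Int.floordiv ((10:Int) ^ (dN * kN) - 1) ((10:Int) ^ dN - 1)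
      = ((sgN dN kN : Nat) : Int) := by
  have hpos : (0:Int) < 10 ^ dN - 1 := by
    have : (10:Int) ^ 1 ≤ 10 ^ dN := pow_le_pow_right₀ (by omega) hd
    simp at this; omega
  rw [PySem.Int.floordiv_eq_ediv_of_pos hpos]
  have hmul : ((sgN dN kN : Nat) : Int) * ((10:Int) ^ dN - 1) = 10 ^ (dN * kN) - 1 := by
    have := sgN_mul dN kN
    have hx : 1 ≤ (10:Nat) ^ dN := Nat.one_le_pow _ _ (by omega)
    have hy : 1 ≤ (10:Nat) ^ (dN * kN) := Nat.one_le_pow _ _ (by omega)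
    zify [hx, hy] at this
    linarith [this]
  rw [← hmul]
  exact Int.mul_ediv_cancel _ (by omega)

lemma sgN_pos_int (dN kN : Nat) (hk : 1 ≤ kN) : (0:Int) < ((sgN dN kN : Nat) : Int) := by
  have := sgN_ge_one dN kN hk
  omega

-- ---- proof-side names for B's computed bounds ----
def BS (L d : Int) : Int := PySem.Int.floordiv ((10:Int) ^ L.toNat - 1) ((10:Int) ^ d.toNat - 1)
def Bplo (lo L d : Int) : Int :=
  let c := -(PySem.Int.floordiv lo (-(BS L d)))
  let p0 := (10:Int) ^ (d-1).toNat
  if c > p0 then c else p0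
def Bphi (hi L d : Int) : Int :=
  let f := PySem.Int.floordiv hi (BS L d)
  let p0 := (10:Int) ^ d.toNat - 1
  if f < p0 then f else p0

def Bseen (l r : Int) : PySem.Set Int :=
  if (if l > 10 then l else 10) ≤ r then
    (PySem.List.pyRange 2 (PySem.List.len (PySem.Int.toChars r) + 1) 1).foldl
      (fun seen L =>
        (PySem.List.pyRange 1 (PySem.Int.floordiv L 2 + 1) 1).foldl
          (fun seen d =>
            if PySem.Int.mod L d ≠ 0 then seen
            else
              (PySem.List.pyRange (Bplo (if l > 10 then l else 10) L d) (Bphi r L d + 1) 1).foldl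
                (fun seen p => PySem.Set.add seen (p * BS L d)) seen)
          seen)
      PySem.Set.empty
  else PySem.Set.empty

lemma alt_eq_Bseen (l r : Int) : part2_par_worker_alt l r = (Bseen l r).sum := rfl

lemma mem_level3 (S a b : Int) (s : PySem.Set Int) (x : Int) :
    x ∈ (PySem.List.pyRange a b 1).foldl (fun s p => PySem.Set.add s (p * S)) s
      ↔ x ∈ s ∨ ∃ p ∈ PySem.List.pyRange a b 1, x = p * S :=
  mem_foldl_iff (fun p x => x = p * S) _ (fun s e x => PySem.Set.mem_add s (e * S) x) _ s x

lemma mem_level2 (lo hi L : Int) (s : PySem.Set Int) (x : Int) :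
    x ∈ (PySem.List.pyRange 1 (PySem.Int.floordiv L 2 + 1) 1).foldl
          (fun seen d =>
            if PySem.Int.mod L d ≠ 0 then seen
            else
              (PySem.List.pyRange (Bplo lo L d) (Bphi hi L d + 1) 1).foldl
                (fun seen p => PySem.Set.add seen (p * BS L d)) seen)
          s
      ↔ x ∈ s ∨ ∃ d ∈ PySem.List.pyRange 1 (PySem.Int.floordiv L 2 + 1) 1,
          (PySem.Int.mod L d = 0 ∧ ∃ p ∈ PySem.List.pyRange (Bplo lo L d) (Bphi hi L d + 1) 1, x = p * BS L d) := by
  refine mem_foldl_iff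
    (fun d x => PySem.Int.mod L d = 0 ∧
      ∃ p ∈ PySem.List.pyRange (Bplo lo L d) (Bphi hi L d + 1) 1, x = p * BS L d)
    _ ?_ _ s x
  intro s' d x'
  by_cases hm : PySem.Int.mod L d = 0
  · simp only [hm, ne_eq, not_true_eq_false, if_false, mem_level3]
    tauto
  · simp [hm]

lemma mem_Bseen (l r x : Int) :
    x ∈ Bseen l r ↔ ((if l > 10 then l else 10) ≤ x ∧ x ≤ r ∧ PerN x) := by
  set lo := if l > 10 then l else 10 with hlo
  have hlo10 : 10 ≤ lo := by rw [hlo]; split_ifs <;> omega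
  unfold Bseen
  rw [← hlo]
  split_ifs with hlr
  case neg =>
    simp only [PySem.Set.empty, List.not_mem_nil, false_iff]
    rintro ⟨h1, h2, _⟩; omega
  case pos =>
    rw [mem_foldl_iff
      (fun L x => ∃ d ∈ PySem.List.pyRange 1 (PySem.Int.floordiv L 2 + 1) 1,
        (PySem.Int.mod L d = 0 ∧ ∃ p ∈ PySem.List.pyRange (Bplo lo L d) (Bphi r L d + 1) 1, x = p * BS L d))
      _ (fun s' L x' => mem_level2 lo r L s' x')]
    simp only [PySem.Set.empty, List.not_mem_nil, false_or]
    constructor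
    · rintro ⟨L, hLmem, d, hdmem, hmod, p, hpmem, hx⟩
      obtain ⟨hL2, hLmax⟩ := PySem.List.mem_pyRange_one.mp hLmem
      obtain ⟨hd1, hdle⟩ := PySem.List.mem_pyRange_one.mp hdmem
      obtain ⟨hplo, hphi⟩ := PySem.List.mem_pyRange_one.mp hpmem
      have hdle' : d ≤ PySem.Int.floordiv L 2 := by omega
      obtain ⟨hk2, hLk⟩ := rc_facts L d (by omega) hdle' hmod
      set kI := PySem.Int.floordiv L d with hkI
      have hLtoNat : L.toNat = d.toNat * kI.toNat := by
        have hd0 : (0:Int) ≤ d := by omega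
        have hk0 : (0:Int) ≤ kI := by omega
        have hcast : ((d.toNat * kI.toNat : Nat) : Int) = L := by
          push_cast
          rw [Int.toNat_of_nonneg hd0, Int.toNat_of_nonneg hk0, ← hLk]
        omega
      have hSeq : BS L d = ((sgN d.toNat kI.toNat : Nat) : Int) := by
        unfold BS
        rw [hLtoNat]
        exact Sval_eq d.toNat kI.toNat (by omega)
      have hSpos : (0:Int) < BS L d := by rw [hSeq]; exact sgN_pos_int _ _ (by omega)
      have hplo' : Bplo lo L d ≤ p := hplo
      have hBplo1 : (10:Int) ^ (d-1).toNat ≤ p := by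
        unfold Bplo at hplo'
        simp only at hplo'
        split_ifs at hplo' with hc <;> omega
      have hBplo2 : -(PySem.Int.floordiv lo (-(BS L d))) ≤ p := by
        unfold Bplo at hplo'
        simp only at hplo'
        split_ifs at hplo' with hc <;> omega
      have hBphi1 : p ≤ (10:Int) ^ d.toNat - 1 := by
        unfold Bphi at hphi
        simp only at hphi
        split_ifs at hphi with hc <;> omega
      have hBphi2 : p ≤ PySem.Int.floordiv r (BS L d) := by
        unfold Bphi at hphi
        simp only at hphi
        split_ifs at hphi with hc <;> omega
      have hxlo : lo ≤ x := by
        rw [hx]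
        exact (ceil_le_iff lo (BS L d) p hSpos).mp hBplo2
      have hxhi : x ≤ r := by
        rw [hx]
        exact (PySem.Int.le_floordiv_iff_mul_le hSpos).mp hBphi2
      refine ⟨hxlo, hxhi, d.toNat, kI.toNat, p.toNat, by omega, by omega, ?_, ?_, ?_⟩
      · have : ((10:Nat) ^ (d.toNat - 1) : Int) ≤ (p.toNat : Int) := by
          push_cast
          rw [show d.toNat - 1 = (d-1).toNat by omega]
          have hp0 : (0:Int) ≤ p := le_trans (by positivity) hBplo1
          omega
        exact_mod_cast this
      · have : ((p.toNat : Int)) < ((10:Nat) ^ d.toNat : Int) := by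
          push_cast
          have hp0 : (0:Int) ≤ p := le_trans (by positivity) hBplo1
          omega
        exact_mod_cast this
      · rw [hx, hSeq]
        have hp0 : (0:Int) ≤ p := le_trans (by positivity) hBplo1
        push_cast
        rw [Int.toNat_of_nonneg hp0]
    · rintro ⟨hxlo, hxhi, dN, kN, pN, hd1, hk2, hplo, hphi, hx⟩
      have hx10 : (10:Int) ≤ x := PerN_ge_ten x ⟨dN, kN, pN, hd1, hk2, hplo, hphi, hx⟩
      have hr10 : (10:Int) ≤ r := le_trans hx10 hxhi
      -- digit-length bound:  dN*kN ≤ length of r's decimal string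
      have hxlen : (digChars x.toNat).length = kN * dN := by
        have h1 : x.toNat = pN * sgN dN kN := by omega
        rw [h1, digChars_sg dN pN hd1 hplo hphi kN (by omega), length_repeat,
          digChars_length_eq dN pN hd1 hplo hphi]
      have hmaxlen : ((dN * kN : Nat) : Int) ≤ PySem.List.len (PySem.Int.toChars r) := by
        simp only [PySem.List.len_eq]
        rw [toChars_nonneg r (by omega)]
        obtain ⟨brlo, brhi⟩ := digChars_bracket r.toNat (by omega)
        obtain ⟨bxlo, _⟩ := digChars_bracket x.toNat (by omega)
        rw [hxlen] at bxlo
        have hxr : x.toNat ≤ r.toNat := by omega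
        by_contra hc
        rw [not_le] at hc
        have hlen_lt : (digChars r.toNat).length ≤ dN * kN - 1 := by omega
        have : (10:Nat) ^ (digChars r.toNat).length ≤ 10 ^ (dN * kN - 1) :=
          Nat.pow_le_pow_right (by omega) hlen_lt
        have : r.toNat < 10 ^ (dN*kN-1) := by omega
        have : x.toNat < 10 ^ (dN*kN-1) := by omega
        rw [show dN*kN-1 = kN*dN-1 by ring_nf] at this
        omega
      set L : Int := ((dN * kN : Nat) : Int) with hLdef
      set d : Int := (dN : Int) with hddef
      have hLd : L = d * (kN : Int) := by rw [hLdef, hddef]; push_cast; ring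
      have hSeq : BS L d = ((sgN dN kN : Nat) : Int) := by
        unfold BS
        have h1 : L.toNat = dN * kN := by omega
        have h2 : d.toNat = dN := by omega
        rw [h1, h2]
        exact Sval_eq dN kN hd1
      have hSpos : (0:Int) < BS L d := by rw [hSeq]; exact sgN_pos_int _ _ (by omega)
      have hxval : x = (pN : Int) * BS L d := by rw [hSeq, hx]; push_cast; ring
      refine ⟨L, ?_, d, ?_, ?_, (pN : Int), ?_, hxval⟩
      · rw [PySem.List.mem_pyRange_one]
        constructor
        · rw [hLdef]; push_cast; nlinarith
        · omega
      · rw [PySem.List.mem_pyRange_one]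
        refine ⟨by omega, ?_⟩
        have : d * 2 ≤ L := by rw [hLd]; nlinarith [Int.ofNat_le.mpr hk2]
        have := (PySem.Int.le_floordiv_iff_mul_le (show (0:Int) < 2 by omega)).mpr this
        omega
      · rw [PySem.Int.mod_eq_zero_iff_dvd]
        exact ⟨(kN : Int), hLd⟩
      · rw [PySem.List.mem_pyRange_one]
        constructor
        · unfold Bplo
          simp only
          have hc1 : -(PySem.Int.floordiv lo (-(BS L d))) ≤ (pN : Int) := by
            rw [ceil_le_iff lo (BS L d) _ hSpos, ← hxval]
            exact hxlo
          have hc2 : (10:Int) ^ (d-1).toNat ≤ (pN : Int) := by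
            have : ((10 ^ (dN - 1) : Nat) : Int) ≤ (pN : Int) := by exact_mod_cast hplo
            rw [show (d-1).toNat = dN - 1 by omega]
            push_cast at this ⊢
            exact this
          split_ifs <;> omega
        · unfold Bphi
          simp only
          have hc1 : (pN : Int) ≤ PySem.Int.floordiv r (BS L d) := by
            rw [PySem.Int.le_floordiv_iff_mul_le hSpos, ← hxval]
            exact hxhi
          have hc2 : (pN : Int) ≤ (10:Int) ^ d.toNat - 1 := by
            have : (pN : Int) < ((10 ^ dN : Nat) : Int) := by exact_mod_cast hphi
            rw [show d.toNat = dN by omega]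
            push_cast at this ⊢
            omega
          split_ifs <;> omega

lemma nodup_Bseen (l r : Int) : (Bseen l r).Nodup := by
  unfold Bseen
  rcases em ((if l > 10 then l else 10) ≤ r) with h | h
  case inr => rw [if_neg h]; exact List.nodup_nil
  case inl =>
    rw [if_pos h]
    refine nodup_foldl _ ?_ _ _ List.nodup_nil
    intro s L hs
    refine nodup_foldl _ ?_ _ _ hs
    intro s' d hs'
    rcases em (PySem.Int.mod L d ≠ 0) with hm | hm
    case inl => rw [if_pos hm]; exact hs'
    case inr =>
      rw [if_neg hm]
      refine nodup_foldl _ ?_ _ _ hs'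
      intro s'' p hs''
      exact nodup_set_add _ _ hs''

lemma A_eq_filter_sum (l r : Int) :
    part2_par_worker l r = (((PySem.List.pyRange l (r+1) 1).filter Afound)).sum := by
  unfold part2_par_worker
  show (PySem.List.pyRange l (r+1) 1).foldl
      (fun local_sum id_int => if Afound id_int then local_sum + id_int else local_sum) 0 = _
  rw [PySem.List.foldl_if_eq_foldl_filter Afound (fun acc x => acc + x)]
  rw [PySem.List.foldl_add _ (fun x => x) 0]
  simp

lemma mem_A_filter (l r x : Int) :
    x ∈ (PySem.List.pyRange l (r+1) 1).filter Afound ↔ (l ≤ x ∧ x ≤ r ∧ PerN x) := by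
  rw [List.mem_filter, PySem.List.mem_pyRange_one]
  constructor
  · rintro ⟨⟨h1, h2⟩, hf⟩
    refine ⟨h1, by omega, ?_⟩
    rcases lt_or_ge x 0 with hx | hx
    · rw [Afound_neg x hx] at hf; exact absurd hf (by simp)
    rcases lt_or_ge x 10 with hx10 | hx10
    · rw [Afound_small x hx hx10] at hf; exact absurd hf (by simp)
    · exact (Afound_iff_Per x hx10).mp hf
  · rintro ⟨h1, h2, hp⟩
    have hx10 := PerN_ge_ten x hp
    exact ⟨⟨h1, by omega⟩, (Afound_iff_Per x hx10).mpr hp⟩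

lemma nodup_A_filter (l r : Int) : ((PySem.List.pyRange l (r+1) 1).filter Afound).Nodup :=
  (PySem.List.nodup_pyRange_one l (r+1)).filter _

-- ===== VERDICT (by name: the statement is the Claim_ definition above) =====
theorem part2_par_worker_spec : Claim_equal_part2_par_worker := by
  unfold Claim_equal_part2_par_worker
  intro l r _
  unfold Spec_part2_par_worker
  rw [A_eq_filter_sum, alt_eq_Bseen]
  refine List.Perm.sum_eq ?_
  rw [List.perm_ext_iff_of_nodup (nodup_A_filter l r) (nodup_Bseen l r)]
  intro x
  rw [mem_A_filter, mem_Bseen]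
  constructor
  · rintro ⟨h1, h2, hp⟩
    have := PerN_ge_ten x hp
    refine ⟨?_, h2, hp⟩
    split_ifs <;> omega
  · rintro ⟨h1, h2, hp⟩
    have := PerN_ge_ten x hp
    refine ⟨?_, h2, hp⟩
    split_ifs at h1 <;> omega
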